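-- pv_equiv track=rewrite | github.com/suyuexinghen/Aeloon | aeloon/core/agent/profiler.py | _extract_wave_metrics
-- ===== SOURCE A (Python) =====
-- def _parse_key_value_line(line: str) -> tuple[str, str] | None:
--     """Parse `Key: Value` lines used in deep-profile sections."""
--     if ":" not in line:
--         return None
--     key, value = line.split(":", 1)
--     key = key.strip()
--     value = value.strip()
--     if not key or not value:
--         return None
--     return key, value
--
-- def _extract_wave_metrics(lines: list[str]) -> tuple[str | None, str | None, str | None]:
--     """Extract wave summary values from an Execute Wave section."""
--     completed = None
--     ready_nodes = None
--     elapsed = None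
--     for line in lines:
--         parsed = _parse_key_value_line(line)
--         if parsed is None:
--             continue
--         key, value = parsed
--         if key == "Completed so far":
--             completed = value
--         elif key == "Ready nodes":
--             ready_nodes = value
--         elif key == "Elapsed":
--             elapsed = value
--     return completed, ready_nodes, elapsed
-- ===== SOURCE B (Python) =====
-- def _parse_key_value_line(line: str):
--     """Parse `Key: Value` lines used in deep-profile sections."""
--     if ":" not in line:
--         return None
--     key, value = line.split(":", 1)
--     key = key.strip()
--     value = value.strip()
--     if not key or not value:
--         return None
--     return key, value
--
-- def _last_value(lines, wanted):
--     """Scan backwards; the first match from the end is the last write."""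
--     for line in reversed(lines):
--         parsed = _parse_key_value_line(line)
--         if parsed is not None and parsed[0] == wanted:
--             return parsed[1]
--     return None
--
-- def _extract_wave_metrics(lines):
--     """Three independent backward scans, each stopping at the last occurrence."""
--     return (_last_value(lines, "Completed so far"),
--             _last_value(lines, "Ready nodes"),
--             _last_value(lines, "Elapsed"))
-- ===== Notes on version B (the rewrite author's own statement) =====
-- stated objective: alternative
-- what changed: B replaces A's single forward pass with three branching accumulators by three independent backward scans, each early-exiting at the first match from the end (the last write), keyed per metric.
import Mathlib
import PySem

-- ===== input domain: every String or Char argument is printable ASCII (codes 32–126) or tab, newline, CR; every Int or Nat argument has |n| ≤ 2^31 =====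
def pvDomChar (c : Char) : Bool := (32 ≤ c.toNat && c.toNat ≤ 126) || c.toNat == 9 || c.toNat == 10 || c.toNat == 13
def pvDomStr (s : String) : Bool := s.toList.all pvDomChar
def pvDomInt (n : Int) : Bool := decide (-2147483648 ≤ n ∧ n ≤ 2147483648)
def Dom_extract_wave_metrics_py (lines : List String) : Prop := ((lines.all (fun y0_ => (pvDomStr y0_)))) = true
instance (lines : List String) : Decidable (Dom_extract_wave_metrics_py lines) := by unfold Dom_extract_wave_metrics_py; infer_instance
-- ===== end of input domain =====

-- B replaces A's single forward pass with three accumulators by three independent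
-- backward scans, each stopping at the last occurrence of its key (objective: alternative).

-- ===== PORT A =====
-- shared module helper `_parse_key_value_line` (identical in Source A and Source B)
def parse_key_value_line_py (line : String) : Option (String × String) :=
  if PySem.Str.isIn ":" line then
    match PySem.Str.splitMax? line ":" 1 with
    | some [k, v] =>
        let key := PySem.Str.strip k
        let value := PySem.Str.strip v
        if key = "" ∨ value = "" then none else some (key, value)
    | _ => none
  else none

def extract_wave_metrics_py (lines : List String) : Option String × Option String × Option String :=
  lines.foldl
    (fun (acc : Option String × Option String × Option String) line =>
      match parse_key_value_line_py line with
      | none => acc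
      | some (key, value) =>
        if key = "Completed so far" then (some value, acc.2.1, acc.2.2)
        else if key = "Ready nodes" then (acc.1, some value, acc.2.2)
        else if key = "Elapsed" then (acc.1, acc.2.1, some value)
        else acc)
    (none, none, none)

-- ===== PORT B =====
-- `for line in reversed(lines): … return parsed[1]` with early exit = findSome? over lines.reverse
def last_value_py (lines : List String) (wanted : String) : Option String :=
  lines.reverse.findSome? (fun line =>
    match parse_key_value_line_py line with
    | some (k, v) => if k = wanted then some v else none
    | none => none)

def extract_wave_metrics_py_alt (lines : List String) : Option String × Option String × Option String :=
  (last_value_py lines "Completed so far",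
   last_value_py lines "Ready nodes",
   last_value_py lines "Elapsed")

-- ===== PRECONDITION & SPEC =====
def Spec_extract_wave_metrics_py (lines : List String) (out : Option String × Option String × Option String) : Prop := out = extract_wave_metrics_py_alt lines
instance (lines : List String) (out : Option String × Option String × Option String) : Decidable (Spec_extract_wave_metrics_py lines out) := by unfold Spec_extract_wave_metrics_py; infer_instance

-- ===== CLAIM =====
def Claim_equal_extract_wave_metrics_py : Prop := ∀ (lines : List String), Dom_extract_wave_metrics_py lines → Spec_extract_wave_metrics_py lines (extract_wave_metrics_py lines)

-- ===== LEMMAS AND PROOFS =====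

theorem last_value_cons (l : String) (rest : List String) (w : String) :
    last_value_py (l :: rest) w
      = (last_value_py rest w).or
          (match parse_key_value_line_py l with
           | some (k, v) => if k = w then some v else none
           | none => none) := by
  unfold last_value_py
  simp [List.findSome?_append, Option.or]

theorem extract_loop_inv (lines : List String) :
    ∀ (acc : Option String × Option String × Option String),
    lines.foldl
      (fun (acc : Option String × Option String × Option String) line =>
        match parse_key_value_line_py line with
        | none => acc
        | some (key, value) =>
          if key = "Completed so far" then (some value, acc.2.1, acc.2.2)
          else if key = "Ready nodes" then (acc.1, some value, acc.2.2)
          else if key = "Elapsed" then (acc.1, acc.2.1, some value)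
          else acc) acc
    = ((last_value_py lines "Completed so far").or acc.1,
       (last_value_py lines "Ready nodes").or acc.2.1,
       (last_value_py lines "Elapsed").or acc.2.2) := by
  induction lines with
  | nil =>
    intro acc
    simp [last_value_py]
  | cons l rest ih =>
    intro acc
    simp only [List.foldl]
    rw [ih]
    rw [last_value_cons, last_value_cons, last_value_cons]
    cases hp : parse_key_value_line_py l with
    | none => simp
    | some kv =>
      obtain ⟨k, v⟩ := kv
      by_cases hA : k = "Completed so far"
      · subst hA; simp
      · by_cases hB : k = "Ready nodes"
        · subst hB; simp [hA]
        · by_cases hC : k = "Elapsed"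
          · subst hC; simp [hA, hB]
          · simp [hA, hB, hC]

-- ===== VERDICT =====
theorem extract_wave_metrics_py_spec : Claim_equal_extract_wave_metrics_py := by
  intro lines _
  unfold Spec_extract_wave_metrics_py extract_wave_metrics_py extract_wave_metrics_py_alt
  rw [extract_loop_inv]
  simp
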